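-- pv_equiv track=rewrite | github.com/Lucas-fullstack/Cracking-Rolling-Code-Locks | prng_finder.py | prng_next
-- ===== SOURCE A (Python) =====
-- def prng_next(state, bits):
--     for _ in range(bits):
--         ret = state & 1
--         state = (state << 1) ^ (state >> 61)
--         state &= 0xFFFFFFFFFFFFFFFF
--         state ^= 0xFFFFFFFFFFFFFFFF
--
--         for j in range(0, 64, 4):
--             cur = (state >> j) & 0xF
--             cur = (cur >> 3) | ((cur >> 2) & 2) | ((cur << 3) & 8) | ((cur << 2) & 4)
--             state ^= cur << j
--     return state
-- ===== SOURCE B (Python) =====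
-- # Same PRNG advance, but instead of iterating the step `bits` times, the step
-- # (a linear map over GF(2)^64) is raised to the needed power by repeated
-- # squaring of its 64x64 bit-matrix, then applied once.
--
-- _MASK = 0xFFFFFFFFFFFFFFFF
--
--
-- def _step(state):
--     state = (state << 1) ^ (state >> 61)
--     state &= _MASK
--     state ^= _MASK
--     for j in range(0, 64, 4):
--         cur = (state >> j) & 0xF
--         cur = (cur >> 3) | ((cur >> 2) & 2) | ((cur << 3) & 8) | ((cur << 2) & 4)
--         state ^= cur << j
--     return state
--
--
-- def _apply(cols, x):
--     r = 0
--     for col in cols: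
--         if x & 1:
--             r ^= col
--         x >>= 1
--     return r
--
--
-- def _matmul(a, b):
--     return [_apply(a, col) for col in b]
--
--
-- _STEP_COLS = [_step(1 << i) for i in range(64)]
--
--
-- def prng_next(state, bits):
--     if bits <= 0:
--         return state
--     state = _step(state)          # first step directly: handles any-sign input
--     e = bits - 1
--     p = _STEP_COLS
--     acc = [1 << i for i in range(64)]  # identity matrix
--     while e:
--         if e & 1:
--             acc = _matmul(p, acc)
--         p = _matmul(p, p)
--         e >>= 1
--     return _apply(acc, state)
-- ===== Notes on version B (the rewrite author's own statement) =====
-- stated objective: faster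
-- what changed: A iterates the 64-bit PRNG step `bits` times; B exploits that the step is a linear map over GF(2)^64, raising its 64x64 bit-matrix to the power bits-1 by repeated squaring (after one direct step that handles arbitrary-sign input) and applying it once.
import Mathlib
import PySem

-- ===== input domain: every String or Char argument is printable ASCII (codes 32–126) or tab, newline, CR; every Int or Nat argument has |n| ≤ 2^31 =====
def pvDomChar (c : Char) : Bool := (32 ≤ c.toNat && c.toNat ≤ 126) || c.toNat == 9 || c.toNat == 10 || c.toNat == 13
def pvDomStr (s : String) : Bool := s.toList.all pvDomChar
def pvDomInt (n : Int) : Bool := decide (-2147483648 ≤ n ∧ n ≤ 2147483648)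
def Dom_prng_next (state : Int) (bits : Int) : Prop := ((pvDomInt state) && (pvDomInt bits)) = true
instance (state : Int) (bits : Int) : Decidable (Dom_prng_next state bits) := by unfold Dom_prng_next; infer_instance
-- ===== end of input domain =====

-- B replaces A's `bits`-fold iteration of the 64-bit PRNG step by one direct step followed by
-- exponentiation-by-squaring of the step's 64x64 GF(2) bit-matrix (the step is linear over xor).

-- ===== PORT A =====

def prng_next (state : Int) (bits : Int) : Int :=
  (PySem.List.pyRange 0 bits 1).foldl (fun state _ =>
    let _ret := PySem.Int.band state 1
    let state := PySem.Int.bxor (state <<< (1:Nat)) (state >>> (61:Nat))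
    let state := PySem.Int.band state 0xFFFFFFFFFFFFFFFF
    let state := PySem.Int.bxor state 0xFFFFFFFFFFFFFFFF
    (PySem.List.pyRange 0 64 4).foldl (fun state j =>
      let jn : Nat := j.toNat
      let cur := PySem.Int.band (state >>> jn) 0xF
      let cur := PySem.Int.bor (PySem.Int.bor (PySem.Int.bor (cur >>> (3:Nat))
                   (PySem.Int.band (cur >>> (2:Nat)) 2)) (PySem.Int.band (cur <<< (3:Nat)) 8))
                   (PySem.Int.band (cur <<< (2:Nat)) 4)
      PySem.Int.bxor state (cur <<< jn)) state) state

-- ===== PORT B =====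

def pvMask : Int := 0xFFFFFFFFFFFFFFFF   -- _MASK of Source B

def pvStep (state : Int) : Int :=
  let state := PySem.Int.bxor (state <<< (1:Nat)) (state >>> (61:Nat))
  let state := PySem.Int.band state pvMask
  let state := PySem.Int.bxor state pvMask
  (PySem.List.pyRange 0 64 4).foldl (fun state j =>
    let jn : Nat := j.toNat
    let cur := PySem.Int.band (state >>> jn) 0xF
    let cur := PySem.Int.bor (PySem.Int.bor (PySem.Int.bor (cur >>> (3:Nat))
                 (PySem.Int.band (cur >>> (2:Nat)) 2)) (PySem.Int.band (cur <<< (3:Nat)) 8))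
                 (PySem.Int.band (cur <<< (2:Nat)) 4)
    PySem.Int.bxor state (cur <<< jn)) state

def pvApply (cols : List Int) (x : Int) : Int :=
  (cols.foldl (fun (rx : Int × Int) col =>
      (if PySem.Int.band rx.2 1 ≠ 0 then PySem.Int.bxor rx.1 col else rx.1, rx.2 >>> (1:Nat)))
    (0, x)).1

def pvMatmul (a : List Int) (b : List Int) : List Int := b.map (fun col => pvApply a col)

def pvStepCols : List Int := (PySem.List.pyRange 0 64 1).map (fun i =>
  let n : Nat := i.toNat  -- i ∈ range(64) is nonnegative, so `.toNat` is exact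
  pvStep ((1 : Int) <<< n))

def pvPowLoop (e : Nat) (p : List Int) (acc : List Int) : List Int :=
  if e = 0 then acc
  else pvPowLoop (e / 2) (pvMatmul p p) (if e % 2 = 1 then pvMatmul p acc else acc)

def prng_next_alt (state : Int) (bits : Int) : Int :=
  if bits ≤ 0 then state
  else
    let s := pvStep state
    let acc := (PySem.List.pyRange 0 64 1).map (fun i =>
      let n : Nat := i.toNat
      (1 : Int) <<< n)
    pvApply (pvPowLoop (bits - 1).toNat pvStepCols acc) s

-- ===== PRECONDITION & SPEC =====
def Spec_prng_next (state : Int) (bits : Int) (out : Int) : Prop := out = prng_next_alt state bits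
instance (state : Int) (bits : Int) (out : Int) : Decidable (Spec_prng_next state bits out) := by unfold Spec_prng_next; infer_instance

-- ===== CLAIM (what is proved, stated in full; the proofs are below) =====
def Claim_equal_prng_next : Prop := ∀ (state : Int) (bits : Int), Dom_prng_next state bits → Spec_prng_next state bits (prng_next state bits)

-- ===== LEMMAS AND PROOFS =====

theorem pv_split (x k j : Nat) :
    (x % 2 ^ (k+1)) <<< j = ((x &&& 1) <<< j) ^^^ (((x >>> 1) % 2 ^ k) <<< (j+1)) := by
  apply Nat.eq_of_testBit_eq; intro i
  simp only [Nat.testBit_shiftLeft, Nat.testBit_xor, Nat.testBit_mod_two_pow,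
    Nat.testBit_shiftRight, Nat.and_one_is_mod]
  by_cases h1 : j ≤ i
  · by_cases h2 : i = j
    · subst h2
      simp
    · have h3 : j + 1 ≤ i := by omega
      have h4 : i - j = (i - (j+1)) + 1 := by omega
      have h5 : x % 2 < 2 ^ ((i - (j+1)) + 1) := by
        have h6 : x % 2 < 2 := Nat.mod_lt x (by norm_num)
        have h7 : (2:Nat) ≤ 2 ^ ((i - (j+1)) + 1) := Nat.le_self_pow (by omega) 2
        omega
      simp only [h1, h3, decide_true, Bool.true_and, h4]
      rw [Nat.testBit_succ, Nat.testBit_lt_two_pow h5,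
        Nat.add_comm 1 (i - (j+1)), Nat.testBit_succ]
      simp
  · have h3 : ¬ (j + 1 ≤ i) := by omega
    simp [h1, h3]

theorem pv_shl_xor (a b j : Nat) : (a ^^^ b) <<< j = (a <<< j) ^^^ (b <<< j) := by
  apply Nat.eq_of_testBit_eq; intro i
  simp [Nat.testBit_shiftLeft, Nat.testBit_xor, Bool.and_xor_distrib_left]

theorem pv_shr_xor (a b j : Nat) : (a ^^^ b) >>> j = (a >>> j) ^^^ (b >>> j) := by
  apply Nat.eq_of_testBit_eq; intro i
  simp [Nat.testBit_shiftRight, Nat.testBit_xor]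

def pvGN (c : Nat) : Nat := (c >>> 3) ||| ((c >>> 2) &&& 2) ||| ((c <<< 3) &&& 8) ||| ((c <<< 2) &&& 4)

def pvUN (j : Nat) (s : Nat) : Nat := s ^^^ ((pvGN ((s >>> j) &&& 15)) <<< j)

theorem pvGN_linear : ∀ a < 16, ∀ b < 16, pvGN (a ^^^ b) = pvGN a ^^^ pvGN b := by decide

theorem pvUN_linear (j x y : Nat) : pvUN j (x ^^^ y) = pvUN j x ^^^ pvUN j y := by
  unfold pvUN
  rw [pv_shr_xor, Nat.and_xor_distrib_right,
    pvGN_linear _ (Nat.lt_succ_of_le (Nat.and_le_right)) _ (Nat.lt_succ_of_le (Nat.and_le_right)),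
    pv_shl_xor]
  simp [Nat.xor_assoc, Nat.xor_comm, Nat.xor_left_comm]

def pvJs : List Nat := [0, 4, 8, 12, 16, 20, 24, 28, 32, 36, 40, 44, 48, 52, 56, 60]

def pvNibs (s : Nat) : Nat := pvJs.foldl (fun s j => pvUN j s) s

def pvMaskN : Nat := 0xFFFFFFFFFFFFFFFF

def pvStepN (s : Nat) : Nat := pvNibs ((((s <<< 1) ^^^ (s >>> 61)) &&& pvMaskN) ^^^ pvMaskN)

theorem pv_fold_lin (js : List Nat) (x y : Nat) :
    js.foldl (fun s j => pvUN j s) (x ^^^ y)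
      = js.foldl (fun s j => pvUN j s) x ^^^ js.foldl (fun s j => pvUN j s) y := by
  induction js generalizing x y with
  | nil => rfl
  | cons j js ih => simp only [List.foldl_cons, pvUN_linear, ih]

theorem pvNibs_linear (x y : Nat) : pvNibs (x ^^^ y) = pvNibs x ^^^ pvNibs y :=
  pv_fold_lin pvJs x y

theorem pvNibs_mask : pvNibs pvMaskN = 0 := by decide

theorem pvStepN_linear (x y : Nat) : pvStepN (x ^^^ y) = pvStepN x ^^^ pvStepN y := by
  unfold pvStepN
  have e1 : (((x ^^^ y) <<< 1) ^^^ ((x ^^^ y) >>> 61))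
      = (((x <<< 1) ^^^ (x >>> 61)) ^^^ ((y <<< 1) ^^^ (y >>> 61))) := by
    rw [pv_shl_xor, pv_shr_xor]
    simp [Nat.xor_assoc, Nat.xor_comm, Nat.xor_left_comm]
  rw [e1, Nat.and_xor_distrib_right]
  set a := ((x <<< 1) ^^^ (x >>> 61)) &&& pvMaskN with ha
  set b := ((y <<< 1) ^^^ (y >>> 61)) &&& pvMaskN with hb
  have e2 : (a ^^^ b) ^^^ pvMaskN
      = (a ^^^ pvMaskN) ^^^ ((b ^^^ pvMaskN) ^^^ pvMaskN) := by
    simp [Nat.xor_assoc, Nat.xor_comm, Nat.xor_left_comm]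
  rw [e2, pvNibs_linear (a ^^^ pvMaskN) ((b ^^^ pvMaskN) ^^^ pvMaskN),
    pvNibs_linear (b ^^^ pvMaskN) pvMaskN, pvNibs_mask]
  simp

theorem pvGN_lt : ∀ c < 16, pvGN c < 16 := by decide

theorem pvUN_lt (j s : Nat) (hj : j ≤ 60) (hs : s < 2 ^ 64) : pvUN j s < 2 ^ 64 := by
  unfold pvUN
  apply Nat.xor_lt_two_pow hs
  have h1 : pvGN ((s >>> j) &&& 15) < 16 := pvGN_lt _ (Nat.lt_succ_of_le Nat.and_le_right)
  rw [Nat.shiftLeft_eq]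
  calc pvGN ((s >>> j) &&& 15) * 2 ^ j ≤ 15 * 2 ^ 60 := by
        apply Nat.mul_le_mul (by omega) (Nat.pow_le_pow_right (by norm_num) hj)
    _ < 2 ^ 64 := by norm_num

theorem pvNibs_lt (s : Nat) (hs : s < 2 ^ 64) : pvNibs s < 2 ^ 64 := by
  have : ∀ js : List Nat, (∀ j ∈ js, j ≤ 60) → ∀ t, t < 2 ^ 64 →
      js.foldl (fun s j => pvUN j s) t < 2 ^ 64 := by
    intro js
    induction js with
    | nil => intro _ t ht; exact ht
    | cons j js ih =>
      intro h t ht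
      exact ih (fun a ha => h a (List.mem_cons_of_mem _ ha))
        _ (pvUN_lt _ _ (h j (List.mem_cons_self)) ht)
  exact this pvJs (by decide) s hs

theorem pvStepN_lt (s : Nat) : pvStepN s < 2 ^ 64 := by
  unfold pvStepN
  apply pvNibs_lt
  apply Nat.xor_lt_two_pow _ (by norm_num [pvMaskN])
  have : (((s <<< 1) ^^^ (s >>> 61)) &&& pvMaskN) ≤ pvMaskN := Nat.and_le_right
  calc (((s <<< 1) ^^^ (s >>> 61)) &&& pvMaskN) ≤ pvMaskN := this
    _ < 2 ^ 64 := by norm_num [pvMaskN]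

def pvApplyN (cols : List Nat) (x : Nat) : Nat :=
  (cols.foldl (fun (rx : Nat × Nat) col =>
      (if rx.2 &&& 1 ≠ 0 then rx.1 ^^^ col else rx.1, rx.2 >>> 1)) (0, x)).1

theorem pvApplyN_aux (cols : List Nat) (r x : Nat) :
    (cols.foldl (fun (rx : Nat × Nat) col =>
      (if rx.2 &&& 1 ≠ 0 then rx.1 ^^^ col else rx.1, rx.2 >>> 1)) (r, x)).1
    = r ^^^ pvApplyN cols x := by
  induction cols generalizing r x with
  | nil => simp [pvApplyN]
  | cons c cs ih =>
    simp only [pvApplyN, List.foldl_cons]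
    by_cases h : x &&& 1 ≠ 0
    · simp only [if_pos h]
      rw [ih (r ^^^ c), ih (0 ^^^ c)]
      simp [Nat.xor_assoc]
    · simp only [if_neg h]
      rw [ih r, ih 0]
      simp

theorem pvApplyN_cons (c : Nat) (cs : List Nat) (x : Nat) :
    pvApplyN (c :: cs) x = (if x &&& 1 ≠ 0 then c else 0) ^^^ pvApplyN cs (x >>> 1) := by
  simp only [pvApplyN, List.foldl_cons]
  by_cases h : x &&& 1 ≠ 0
  · simp only [if_pos h]
    rw [pvApplyN_aux cs (0 ^^^ c) (x >>> 1)]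
    show 0 ^^^ c ^^^ pvApplyN cs (x >>> 1) = c ^^^ pvApplyN (cs) (x >>> 1)
    simp
  · simp only [if_neg h]
    simpa using pvApplyN_aux cs 0 (x >>> 1)

theorem pvApplyN_linear (cols : List Nat) (x y : Nat) :
    pvApplyN cols (x ^^^ y) = pvApplyN cols x ^^^ pvApplyN cols y := by
  induction cols generalizing x y with
  | nil => simp [pvApplyN]
  | cons c cs ih =>
    rw [pvApplyN_cons, pvApplyN_cons, pvApplyN_cons, pv_shr_xor, ih,
      Nat.and_xor_distrib_right]
    have hx : x &&& 1 = 0 ∨ x &&& 1 = 1 := by rw [Nat.and_one_is_mod]; omega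
    have hy : y &&& 1 = 0 ∨ y &&& 1 = 1 := by rw [Nat.and_one_is_mod]; omega
    rcases hx with hx | hx <;> rcases hy with hy | hy <;>
      simp [hx, hy, Nat.xor_comm, Nat.xor_left_comm]

theorem pvApplyN_map_lin (g : Nat → Nat) (hg : ∀ a b, g (a ^^^ b) = g a ^^^ g b)
    (cols : List Nat) (x : Nat) : pvApplyN (cols.map g) x = g (pvApplyN cols x) := by
  have hg0 : g 0 = 0 := by
    have := hg 0 0; simp at this; exact this
  induction cols generalizing x with
  | nil => simp [pvApplyN, hg0]
  | cons c cs ih =>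
    rw [List.map_cons, pvApplyN_cons, pvApplyN_cons, ih, hg]
    by_cases h : x % 2 = 1 <;> simp [h, hg0]

theorem pvApplyN_cols (f : Nat → Nat) (hf : ∀ a b, f (a ^^^ b) = f a ^^^ f b) :
    ∀ (k j x : Nat), pvApplyN ((List.range' j k).map (fun i => f ((2 : Nat) ^ i))) x
      = f ((x % 2 ^ k) <<< j) := by
  have hf0 : f 0 = 0 := by have := hf 0 0; simpa using this
  intro k
  induction k with
  | zero => intro j x; simp [pvApplyN, Nat.mod_one, Nat.zero_shiftLeft, hf0]
  | succ k ih =>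
    intro j x
    rw [List.range'_succ, List.map_cons, pvApplyN_cons, ih (j+1) (x >>> 1), pv_split x k j, hf]
    congr 1
    have hx : x &&& 1 = 0 ∨ x &&& 1 = 1 := by rw [Nat.and_one_is_mod]; omega
    rcases hx with hx | hx <;> simp [hx, hf0, Nat.shiftLeft_eq]

def pvMatmulN (a : List Nat) (b : List Nat) : List Nat := b.map (fun col => pvApplyN a col)

def pvPowLoopN (e : Nat) (p : List Nat) (acc : List Nat) : List Nat :=
  if e = 0 then acc
  else pvPowLoopN (e / 2) (pvMatmulN p p) (if e % 2 = 1 then pvMatmulN p acc else acc)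

def pvStepColsN : List Nat := (List.range' 0 64).map (fun i => pvStepN ((1 : Nat) <<< i))

def pvIdColsN : List Nat := (List.range' 0 64).map (fun i => (1 : Nat) <<< i)

theorem pvMatmulN_sem (a b : List Nat) (x : Nat) :
    pvApplyN (pvMatmulN a b) x = pvApplyN a (pvApplyN b x) := by
  unfold pvMatmulN
  exact pvApplyN_map_lin (pvApplyN a) (pvApplyN_linear a) b x

theorem pvPowLoopN_sem (e : Nat) (p acc : List Nat) (x : Nat) :
    pvApplyN (pvPowLoopN e p acc) x = (pvApplyN p)^[e] (pvApplyN acc x) := by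
  induction e using Nat.strong_induction_on generalizing p acc x with
  | _ e ih =>
    by_cases he : e = 0
    · subst he; simp [pvPowLoopN]
    · rw [pvPowLoopN, if_neg he, ih (e / 2) (by omega)]
      have hsq : pvApplyN (pvMatmulN p p) = (pvApplyN p)^[2] := by
        funext z
        rw [pvMatmulN_sem p p z]
        simp [Function.iterate_succ]
      rw [hsq, ← Function.iterate_mul]
      by_cases hodd : e % 2 = 1
      · rw [if_pos hodd, pvMatmulN_sem]
        have : (pvApplyN p)^[2 * (e / 2)] (pvApplyN p (pvApplyN acc x))
            = (pvApplyN p)^[2 * (e / 2) + 1] (pvApplyN acc x) := by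
          rw [Function.iterate_succ_apply]
        rw [this, show 2 * (e / 2) + 1 = e by omega]
      · rw [if_neg hodd, show 2 * (e / 2) = e by omega]

theorem pvStepColsN_sem (x : Nat) (hx : x < 2 ^ 64) : pvApplyN pvStepColsN x = pvStepN x := by
  unfold pvStepColsN
  have h : ∀ i : Nat, pvStepN ((1:Nat) <<< i) = pvStepN ((2:Nat) ^ i) := by
    intro i; rw [Nat.shiftLeft_eq, Nat.one_mul]
  rw [show ((List.range' 0 64).map (fun i => pvStepN ((1:Nat) <<< i)))
      = ((List.range' 0 64).map (fun i => pvStepN ((2:Nat) ^ i))) from by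
    apply List.map_congr_left; intro i _; exact h i]
  rw [pvApplyN_cols pvStepN pvStepN_linear 64 0 x, Nat.mod_eq_of_lt hx, Nat.shiftLeft_zero]

theorem pvIdColsN_sem (x : Nat) (hx : x < 2 ^ 64) : pvApplyN pvIdColsN x = x := by
  unfold pvIdColsN
  rw [show ((List.range' 0 64).map (fun i => (1:Nat) <<< i))
      = ((List.range' 0 64).map (fun i => id ((2:Nat) ^ i))) from by
    apply List.map_congr_left; intro i _; simp [Nat.shiftLeft_eq]]
  rw [pvApplyN_cols id (fun _ _ => rfl) 64 0 x, Nat.mod_eq_of_lt hx, Nat.shiftLeft_zero]; rfl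

theorem pvRange644 : PySem.List.pyRange 0 64 4
    = [0, 4, 8, 12, 16, 20, 24, 28, 32, 36, 40, 44, 48, 52, 56, 60] := by decide

theorem pvMask_cast : pvMask = ((pvMaskN : Nat) : Int) := by rfl

theorem pvBody_cast (m j : Nat) :
    (PySem.Int.bxor (↑m) ((PySem.Int.bor (PySem.Int.bor (PySem.Int.bor
        ((PySem.Int.band ((↑m : Int) >>> j) 0xF) >>> (3:Nat))
        (PySem.Int.band ((PySem.Int.band ((↑m : Int) >>> j) 0xF) >>> (2:Nat)) 2))
        (PySem.Int.band ((PySem.Int.band ((↑m : Int) >>> j) 0xF) <<< (3:Nat)) 8))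
        (PySem.Int.band ((PySem.Int.band ((↑m : Int) >>> j) 0xF) <<< (2:Nat)) 4)) <<< j))
      = ↑(pvUN j m) := by
  have c15 : (0xF : Int) = ((15 : Nat) : Int) := by norm_num
  have c2 : (2 : Int) = ((2 : Nat) : Int) := by norm_num
  have c8 : (8 : Int) = ((8 : Nat) : Int) := by norm_num
  have c4 : (4 : Int) = ((4 : Nat) : Int) := by norm_num
  rw [c15, c2, c8, c4, ← Int.natCast_shiftRight m j, PySem.Int.band_natCast,
    ← Int.natCast_shiftRight _ 3, ← Int.natCast_shiftRight _ 2,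
    ← Int.natCast_shiftLeft _ 3, ← Int.natCast_shiftLeft _ 2,
    PySem.Int.band_natCast, PySem.Int.band_natCast, PySem.Int.band_natCast,
    PySem.Int.bor_natCast, PySem.Int.bor_natCast, PySem.Int.bor_natCast,
    ← Int.natCast_shiftLeft, PySem.Int.bxor_natCast]
  rfl

theorem pvFoldBody_cast (js : List Int) (m : Nat) :
    js.foldl (fun (state : Int) (j : Int) =>
      let jn : Nat := j.toNat
      let cur := PySem.Int.band (state >>> jn) 0xF
      let cur := PySem.Int.bor (PySem.Int.bor (PySem.Int.bor (cur >>> (3:Nat))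
                   (PySem.Int.band (cur >>> (2:Nat)) 2)) (PySem.Int.band (cur <<< (3:Nat)) 8))
                   (PySem.Int.band (cur <<< (2:Nat)) 4)
      PySem.Int.bxor state (cur <<< jn)) (↑m : Int)
    = ↑(js.foldl (fun s j => pvUN j.toNat s) m) := by
  induction js generalizing m with
  | nil => rfl
  | cons j js ih =>
    simp only [List.foldl_cons]
    rw [pvBody_cast m j.toNat]
    exact ih (pvUN j.toNat m)

theorem pvStep_cast (m : Nat) : pvStep (↑m) = ↑(pvStepN m) := by
  simp only [pvStep]
  rw [← Int.natCast_shiftLeft m 1, ← Int.natCast_shiftRight m 61, PySem.Int.bxor_natCast,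
    pvMask_cast, PySem.Int.band_natCast, PySem.Int.bxor_natCast, pvFoldBody_cast, pvRange644]
  rfl

theorem pvStep_bounded (s : Int) : ∃ m : Nat, m < 2 ^ 64 ∧ pvStep s = ↑m := by
  have hband : ∃ k : Nat, k ≤ pvMaskN ∧
      PySem.Int.band (PySem.Int.bxor (s <<< (1:Nat)) (s >>> (61:Nat))) pvMask = ↑k := by
    set X := PySem.Int.bxor (s <<< (1:Nat)) (s >>> (61:Nat)) with hX
    by_cases h : 0 ≤ X
    · refine ⟨X.toNat &&& pvMaskN, Nat.and_le_right, ?_⟩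
      rw [pvMask_cast, PySem.Int.band_of_nonneg h (by positivity), Int.toNat_natCast]
    · refine ⟨pvMaskN - (pvMaskN &&& (-X - 1).toNat), by omega, ?_⟩
      rw [pvMask_cast, PySem.Int.band, if_neg h, if_pos (by positivity : (0:Int) ≤ ↑pvMaskN),
        Int.toNat_natCast]
  obtain ⟨k, hk, hband⟩ := hband
  simp only [pvStep]
  rw [hband, pvMask_cast, PySem.Int.bxor_natCast, pvFoldBody_cast, pvRange644]
  refine ⟨_, ?_, rfl⟩
  have he : ([(0:Int), 4, 8, 12, 16, 20, 24, 28, 32, 36, 40, 44, 48, 52, 56, 60].foldl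
      (fun s j => pvUN j.toNat s) (k ^^^ pvMaskN)) = pvNibs (k ^^^ pvMaskN) := rfl
  rw [he]
  have hkb : k < 2 ^ 64 := by have : pvMaskN < 2 ^ 64 := by norm_num [pvMaskN]
                              omega
  exact pvNibs_lt _ (Nat.xor_lt_two_pow hkb (by norm_num [pvMaskN]))

def pvCast (n : Nat) : Int := ↑n

theorem pvBand1_cast (x : Nat) : PySem.Int.band (↑x) (1:Int) = ↑(x &&& 1) := by
  rw [show (1:Int) = ((1:Nat):Int) from rfl, PySem.Int.band_natCast]

theorem pvApply_aux_cast (cols : List Nat) (r x : Nat) :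
    (cols.map pvCast).foldl (fun (rx : Int × Int) col =>
      (if PySem.Int.band rx.2 1 ≠ 0 then PySem.Int.bxor rx.1 col else rx.1, rx.2 >>> (1:Nat)))
      ((↑r : Int), (↑x : Int))
    = (↑((cols.foldl (fun (rx : Nat × Nat) col =>
        (if rx.2 &&& 1 ≠ 0 then rx.1 ^^^ col else rx.1, rx.2 >>> 1)) (r, x)).1 : Nat),
       (↑((cols.foldl (fun (rx : Nat × Nat) col =>
        (if rx.2 &&& 1 ≠ 0 then rx.1 ^^^ col else rx.1, rx.2 >>> 1)) (r, x)).2 : Nat) : Int)) := by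
  induction cols generalizing r x with
  | nil => rfl
  | cons c cs ih =>
    simp only [List.map_cons, List.foldl_cons, pvBand1_cast, ← Int.natCast_shiftRight]
    have hcond : ((↑(x &&& 1) : Int) ≠ 0) ↔ (x &&& 1 ≠ 0) := by
      constructor
      · intro h h2; exact h (by rw [h2]; rfl)
      · intro h h2; exact h (by exact_mod_cast h2)
    by_cases h : x &&& 1 ≠ 0
    · rw [if_pos (hcond.mpr h), if_pos h]
      exact ih (r ^^^ c) (x >>> 1)
    · rw [if_neg (fun hc => h (hcond.mp hc)), if_neg h]
      exact ih r (x >>> 1)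

theorem pvApply_cast (cols : List Nat) (x : Nat) :
    pvApply (cols.map pvCast) (↑x) = ↑(pvApplyN cols x) := by
  unfold pvApply pvApplyN
  rw [show ((0:Int), (↑x:Int)) = ((↑(0:Nat) : Int), (↑x : Int)) from rfl, pvApply_aux_cast]

theorem pvMatmul_cast (a b : List Nat) :
    pvMatmul (a.map pvCast) (b.map pvCast)
      = (pvMatmulN a b).map pvCast := by
  unfold pvMatmul pvMatmulN
  rw [List.map_map, List.map_map]
  apply List.map_congr_left
  intro c _
  exact pvApply_cast a c

theorem pvPowLoop_cast (e : Nat) (p acc : List Nat) :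
    pvPowLoop e (p.map pvCast) (acc.map pvCast)
      = (pvPowLoopN e p acc).map pvCast := by
  induction e using Nat.strong_induction_on generalizing p acc with
  | _ e ih =>
    by_cases he : e = 0
    · subst he; rw [pvPowLoop, pvPowLoopN]; simp
    · rw [pvPowLoop, pvPowLoopN, if_neg he, if_neg he, pvMatmul_cast]
      by_cases hodd : e % 2 = 1
      · rw [if_pos hodd, if_pos hodd, pvMatmul_cast, ih (e / 2) (by omega)]
      · rw [if_neg hodd, if_neg hodd, ih (e / 2) (by omega)]

theorem pvRange64 : PySem.List.pyRange 0 64 1 = (List.range' 0 64).map pvCast := by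
  rw [PySem.List.pyRange_one, List.range_eq_range']
  apply List.map_congr_left
  intro k _
  simp [pvCast]

theorem pvStepCols_cast : pvStepCols = pvStepColsN.map pvCast := by
  unfold pvStepCols pvStepColsN
  rw [pvRange64, List.map_map, List.map_map]
  apply List.map_congr_left
  intro i _
  simp only [Function.comp_apply]
  show pvStep ((1:Int) <<< (pvCast i).toNat) = pvCast (pvStepN (1 <<< i))
  rw [show (pvCast i).toNat = i from by simp [pvCast],
    show (1:Int) <<< i = ((((1:Nat) <<< i : Nat)) : Int) from by
      rw [Int.natCast_shiftLeft]; rfl,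
    pvStep_cast]
  rfl

theorem pvIdCols_cast :
    (PySem.List.pyRange 0 64 1).map (fun i =>
      let n : Nat := i.toNat
      (1 : Int) <<< n) = pvIdColsN.map pvCast := by
  unfold pvIdColsN
  rw [pvRange64, List.map_map, List.map_map]
  apply List.map_congr_left
  intro i _
  simp only [Function.comp_apply]
  show (1:Int) <<< (pvCast i).toNat = pvCast (1 <<< i)
  rw [show (pvCast i).toNat = i from by simp [pvCast],
    show (1:Int) <<< i = ((((1:Nat) <<< i : Nat)) : Int) from by
      rw [Int.natCast_shiftLeft]; rfl]
  rfl

theorem pv_fold_const {α : Type} (l : List α) (f : Int → Int) (x : Int) :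
    l.foldl (fun s _ => f s) x = f^[l.length] x := by
  induction l generalizing x with
  | nil => rfl
  | cons a l ih => simp [List.foldl_cons, ih, Function.iterate_succ_apply]

theorem pvStep_iterate_cast (e : Nat) (m : Nat) : pvStep^[e] (↑m) = ↑(pvStepN^[e] m) := by
  induction e generalizing m with
  | zero => rfl
  | succ e ih => rw [Function.iterate_succ_apply, Function.iterate_succ_apply, pvStep_cast, ih]

theorem pvStepN_iter_apply (e : Nat) (m : Nat) (hm : m < 2 ^ 64) :
    (pvApplyN pvStepColsN)^[e] m = pvStepN^[e] m := by
  induction e generalizing m with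
  | zero => rfl
  | succ e ih =>
    rw [Function.iterate_succ_apply, Function.iterate_succ_apply, pvStepColsN_sem m hm,
      ih _ (pvStepN_lt m)]

theorem pv_main (state bits : Int) : prng_next state bits = prng_next_alt state bits := by
  have hA : prng_next state bits = pvStep^[bits.toNat] state := by
    show (PySem.List.pyRange 0 bits 1).foldl (fun s _ => pvStep s) state = _
    rw [pv_fold_const, PySem.List.length_pyRange_one]
    norm_num
  by_cases hb : bits ≤ 0
  · rw [hA, show bits.toNat = 0 from by omega, prng_next_alt, if_pos hb]
    rfl
  · obtain ⟨m0, hm0, hs⟩ := pvStep_bounded state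
    have he : bits.toNat = (bits.toNat - 1) + 1 := by omega
    rw [hA, he, Function.iterate_succ_apply, hs, pvStep_iterate_cast]
    rw [prng_next_alt, if_neg hb]
    simp only
    rw [hs, pvStepCols_cast, pvIdCols_cast, pvPowLoop_cast, pvApply_cast,
      pvPowLoopN_sem, pvIdColsN_sem m0 hm0,
      show (bits - 1).toNat = bits.toNat - 1 from by omega,
      pvStepN_iter_apply _ m0 hm0]

-- ===== VERDICT (by name: the statement is the Claim_ definition above) =====
theorem prng_next_spec : Claim_equal_prng_next := by
  intro state bits _
  unfold Spec_prng_next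
  exact pv_main state bits
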